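-- pv_equiv track=rewrite | github.com/overtrack-gg/overtrack-game-processing | overtrack/apex/collect/apex_game/squad.py | norm_name
-- ===== SOURCE A (Python) =====
-- def norm_name(s: str) -> str:
--     rs = s
--     for c1, c2 in '0O', 'DO', 'lI', '1I':
--         rs = rs.replace(c1, c2)
--     for dc in '_-':
--         while dc * 2 in rs:
--             rs = rs.replace(dc * 2, dc)
--     return rs
-- ===== SOURCE B (Python) =====
-- def norm_name(s: str) -> str:
--     rs = s.translate(str.maketrans('0Dl1', 'OOII'))
--     out = []
--     for c in rs:
--         if c in '_-' and out and out[-1] == c: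
--             continue
--         out.append(c)
--     return ''.join(out)
-- ===== Notes on version B (the rewrite author's own statement) =====
-- stated objective: alternative
-- what changed: Replaces the four sequential str.replace calls with one translation table and the two fixpoint while-loops of pairwise replaces with a single linear pass that drops a '_' or '-' equal to the previously kept character.
import Mathlib
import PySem

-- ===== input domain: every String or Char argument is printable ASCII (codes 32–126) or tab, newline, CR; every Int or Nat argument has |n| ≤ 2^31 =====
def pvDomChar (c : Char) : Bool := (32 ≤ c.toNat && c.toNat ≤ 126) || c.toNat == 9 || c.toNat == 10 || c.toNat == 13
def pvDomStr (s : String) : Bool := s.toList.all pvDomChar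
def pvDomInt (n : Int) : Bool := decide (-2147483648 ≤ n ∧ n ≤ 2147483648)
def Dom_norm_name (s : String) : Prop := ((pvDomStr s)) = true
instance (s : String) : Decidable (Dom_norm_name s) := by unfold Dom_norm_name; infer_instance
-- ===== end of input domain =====

-- B replaces A's four sequential replaces by one per-character translation and A's fixpoint
-- while-loops of pairwise replaces by a single pass that drops a repeated '_' or '-'
-- (a different algorithm of similar cost).

-- ===== PORT A =====
-- One step of Python's rs.replace(dc+dc, dc) (left-to-right, non-overlapping); used only to
-- prove that A's while-loop terminates (replace_dd_eq_rep1 identifies it with PySem's replace).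
def rep1 (d : Char) : List Char → List Char
  | a :: b :: t => if a = d ∧ b = d then d :: rep1 d t else a :: rep1 d (b :: t)
  | l => l

theorem rep1_length_le (d : Char) (l : List Char) : (rep1 d l).length ≤ l.length := by
  fun_induction rep1 d l <;> simp_all <;> omega

theorem rep1_length_lt (d : Char) (l : List Char) (h : [d, d] <:+: l) :
    (rep1 d l).length < l.length := by
  fun_induction rep1 d l with
  | case1 a b t hp ih =>
    have := rep1_length_le d t
    simp; omega
  | case2 a b t hp ih =>
    have h2 : [d, d] <:+: b :: t := by
      rcases (List.infix_cons_iff).mp h with hpre | htl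
      · obtain ⟨r, hr⟩ := hpre
        simp at hr
        exact absurd ⟨hr.1.symm, hr.2.1.symm⟩ hp
      · exact htl
    have := ih h2
    simp_all
  | case3 l hl =>
    exfalso
    have hle := h.length_le
    rcases l with _ | ⟨a, _ | ⟨b, t⟩⟩
    · simp_all
    · simp_all
    · exact hl a b t rfl

theorem go_dd (d : Char) (fuel : Nat) (l acc : List Char) (h : l.length ≤ fuel) :
    PySem.Chars.replace.go [d, d] [d] fuel l acc = acc.reverse ++ rep1 d l := by
  induction fuel generalizing l acc with
  | zero =>
    have : l = [] := List.length_eq_zero_iff.mp (Nat.le_zero.mp h)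
    subst this; simp [PySem.Chars.replace.go, rep1]
  | succ n ih =>
    match l with
    | [] => simp [PySem.Chars.replace.go, rep1]
    | [a] =>
      have hpf : List.isPrefixOf [d, d] [a] = false := by simp [List.isPrefixOf]
      simp [PySem.Chars.replace.go, hpf, rep1,
        ih (l := []) (acc := a :: acc) (by simp), List.reverse_cons]
    | a :: b :: t =>
      by_cases hp : a = d ∧ b = d
      · have hpf : List.isPrefixOf [d, d] (a :: b :: t) = true := by
          simp [List.isPrefixOf, hp.1, hp.2]
        simp only [PySem.Chars.replace.go, hpf, if_true, List.drop, List.length]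
        rw [ih _ _ (by simp at h; omega)]
        simp [rep1, hp.1, hp.2]
      · have hpf : List.isPrefixOf [d, d] (a :: b :: t) = false := by
          simp [List.isPrefixOf]
          intro h1 h2; exact hp ⟨h1.symm, h2.symm⟩
        simp only [PySem.Chars.replace.go, hpf, Bool.false_eq_true, if_false]
        rw [ih _ _ (by simp at h ⊢; omega)]
        simp [rep1, hp]

theorem replace_dd_eq_rep1 (d : Char) (l : List Char) :
    PySem.Chars.replace l [d, d] [d] = rep1 d l := by
  simp [PySem.Chars.replace, go_dd d l.length l [] le_rfl]

theorem replace_dd_length_lt (d : Char) (rs : String)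
    (h : PySem.Str.isIn (String.ofList [d, d]) rs = true) :
    (PySem.Str.replace rs (String.ofList [d, d]) (String.ofList [d])).length < rs.length := by
  have hinf : [d, d] <:+: rs.toList := by
    have := (PySem.Str.isIn_iff_infix _ _).mp h
    simpa using this
  have hlen := congrArg List.length (PySem.Str.toList_replace rs (String.ofList [d, d]) (String.ofList [d]))
  show (PySem.Str.replace rs _ _).toList.length < rs.toList.length
  rw [hlen]
  simp only [String.toList_ofList]
  rw [replace_dd_eq_rep1]
  exact rep1_length_lt d _ hinf

-- the Python `while dc*2 in rs: rs = rs.replace(dc*2, dc)` loop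
def squeezeLoop (dc : Char) (rs : String) : String :=
  if h : PySem.Str.isIn (String.ofList [dc, dc]) rs = true then
    squeezeLoop dc (PySem.Str.replace rs (String.ofList [dc, dc]) (String.ofList [dc]))
  else rs
termination_by rs.length
decreasing_by exact replace_dd_length_lt dc rs h

def norm_name (s : String) : String :=
  let rs := s
  let rs := PySem.Str.replace rs "0" "O"
  let rs := PySem.Str.replace rs "D" "O"
  let rs := PySem.Str.replace rs "l" "I"
  let rs := PySem.Str.replace rs "1" "I"
  let rs := squeezeLoop '_' rs
  let rs := squeezeLoop '-' rs
  rs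

-- ===== PORT B =====
-- str.maketrans('0Dl1', 'OOII') applied by translate
def nnTrans (c : Char) : Char :=
  if c = '0' then 'O' else if c = 'D' then 'O' else if c = 'l' then 'I' else if c = '1' then 'I' else c

-- the body of B's single for-loop: append c unless it is '_'/'-' and equals the last kept char
def nnStep (out : List Char) (c : Char) : List Char :=
  if (c = '_' ∨ c = '-') ∧ out ≠ [] ∧ out.getLast? = some c then out else out ++ [c]

def norm_name_alt (s : String) : String :=
  String.ofList ((s.toList.map nnTrans).foldl nnStep [])

-- ===== PRECONDITION & SPEC =====
def Spec_norm_name (s : String) (out : String) : Prop := out = norm_name_alt s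
instance (s : String) (out : String) : Decidable (Spec_norm_name s out) := by unfold Spec_norm_name; infer_instance

-- ===== CLAIM (what is proved, stated in full; the proofs are below) =====
def Claim_equal_norm_name : Prop := ∀ (s : String), Dom_norm_name s → Spec_norm_name s (norm_name s)

-- ===== LEMMAS AND PROOFS =====

-- full collapse of runs of d (the fixpoint A's while-loop reaches)
def sqz (d : Char) : List Char → List Char
  | [] => []
  | a :: t => if a = d then d :: sqz d (t.dropWhile (· == d)) else a :: sqz d t
termination_by l => l.length
decreasing_by · exact Nat.lt_succ_of_le (List.length_dropWhile_le _ _)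
              · simp

-- one-pass collapse of runs of both '_' and '-' (what B computes)
def dsq : List Char → List Char
  | [] => []
  | a :: t => if a = '_' ∨ a = '-' then a :: dsq (t.dropWhile (· == a)) else a :: dsq t
termination_by l => l.length
decreasing_by · exact Nat.lt_succ_of_le (List.length_dropWhile_le _ _)
              · simp

-- B's loop with an explicit "last kept char" state
def collB (last : Option Char) : List Char → List Char
  | [] => []
  | c :: t => if (c = '_' ∨ c = '-') ∧ last = some c then collB last t else c :: collB (some c) t

theorem sqz_of_no_pair (d : Char) (l : List Char) (h : ¬ [d, d] <:+: l) : sqz d l = l := by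
  fun_induction sqz d l with
  | case1 => rfl
  | case2 t ih =>
    have ht : t.dropWhile (· == d) = t := by
      cases t with
      | nil => rfl
      | cons b u =>
        have hb : ¬ (b == d) = true := by
          simp; rintro rfl
          exact h ⟨[], [u.drop 0].flatten, by simp⟩
        simp [List.dropWhile, hb]
    rw [ht] at ih ⊢
    rw [ih (fun hi => h (hi.trans (List.suffix_cons d t).isInfix))]
  | case3 a t ha ih =>
    rw [ih (fun hi => h (hi.trans (List.suffix_cons a t).isInfix))]

theorem sqz_dd (d : Char) (u : List Char) : sqz d (d :: d :: u) = sqz d (d :: u) := by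
  simp [sqz, List.dropWhile]

theorem sqz_cons_ne (d a : Char) (u : List Char) (ha : a ≠ d) :
    sqz d (a :: u) = a :: sqz d u := by
  simp [sqz, ha]

theorem sqz_d_cons_ne (d a : Char) (u : List Char) (ha : a ≠ d) :
    sqz d (d :: a :: u) = d :: sqz d (a :: u) := by
  have hb : (a == d) = false := by simp [ha]
  conv_lhs => rw [sqz]
  simp [List.dropWhile, hb]

theorem sqz_rep1_aux (d : Char) (n : Nat) :
    ∀ l : List Char, l.length ≤ n →
      sqz d (rep1 d l) = sqz d l ∧ sqz d (d :: rep1 d l) = sqz d (d :: l) := by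
  induction n with
  | zero =>
    intro l hl
    have : l = [] := List.length_eq_zero_iff.mp (Nat.le_zero.mp hl)
    subst this; exact ⟨rfl, rfl⟩
  | succ n ih =>
    intro l hl
    rcases l with _ | ⟨a, _ | ⟨b, t⟩⟩
    · exact ⟨rfl, rfl⟩
    · exact ⟨rfl, rfl⟩
    · simp only [List.length_cons] at hl
      by_cases hp : a = d ∧ b = d
      · rw [hp.1, hp.2]
        rw [show rep1 d (d :: d :: t) = d :: rep1 d t from by simp [rep1]]
        have hQ := (ih t (by omega)).2
        exact ⟨by rw [sqz_dd, hQ], by rw [sqz_dd, sqz_dd, hQ, sqz_dd]⟩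
      · rw [show rep1 d (a :: b :: t) = a :: rep1 d (b :: t) from by simp [rep1, hp]]
        by_cases had : a = d
        · subst had
          have hQ := (ih (b :: t) (by simp; omega)).2
          constructor
          · exact hQ
          · rw [sqz_dd, sqz_dd, hQ]
        · have hP := (ih (b :: t) (by simp; omega)).1
          constructor
          · rw [sqz_cons_ne d a _ had, sqz_cons_ne d a _ had, hP]
          · rw [sqz_d_cons_ne d a _ had, sqz_d_cons_ne d a _ had,
              sqz_cons_ne d a _ had, sqz_cons_ne d a _ had, hP]

theorem sqz_rep1 (d : Char) (l : List Char) : sqz d (rep1 d l) = sqz d l :=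
  (sqz_rep1_aux d l.length l le_rfl).1

theorem squeezeLoop_toList (d : Char) (rs : String) :
    (squeezeLoop d rs).toList = sqz d rs.toList := by
  fun_induction squeezeLoop d rs with
  | case1 rs h ih =>
    rw [ih, PySem.Str.toList_replace]
    simp only [String.toList_ofList]
    rw [replace_dd_eq_rep1, sqz_rep1]
  | case2 rs h =>
    have hni : ¬ [d, d] <:+: rs.toList := by
      intro hi
      exact h ((PySem.Str.isIn_iff_infix _ _).mpr (by simpa using hi))
    rw [sqz_of_no_pair d _ hni]

theorem dropWhile_sqz (t : List Char) :
    (sqz '_' t).dropWhile (· == '-') = sqz '_' (t.dropWhile (· == '-')) := by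
  fun_induction sqz '_' t with
  | case1 => simp [sqz]
  | case2 u ih =>
    have h1 : ∀ v : List Char, List.dropWhile (· == '-') ('_' :: v) = '_' :: v := by
      intro v; simp [List.dropWhile]
    rw [h1, h1]
    conv_rhs => rw [sqz]
    simp
  | case3 a u ha ih =>
    by_cases hm : a = '-'
    · subst hm
      have h1 : ∀ v : List Char, List.dropWhile (· == '-') ('-' :: v) = List.dropWhile (· == '-') v := by
        intro v; simp [List.dropWhile]
      rw [h1, h1, ih]
    · have hb : (a == '-') = false := by simp [hm]
      simp [List.dropWhile, hb, sqz_cons_ne '_' a _ ha]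

theorem sqz_sqz_eq_dsq (l : List Char) : sqz '-' (sqz '_' l) = dsq l := by
  fun_induction dsq l with
  | case1 => simp [sqz]
  | case2 a t hsp ih =>
    rcases hsp with rfl | rfl
    · rw [show sqz '_' ('_' :: t) = '_' :: sqz '_' (t.dropWhile (· == '_')) from by
        conv_lhs => rw [sqz]
        simp]
      rw [sqz_cons_ne '-' '_' _ (by decide), ih]
    · rw [sqz_cons_ne '_' '-' _ (by decide)]
      rw [show sqz '-' ('-' :: sqz '_' t) = '-' :: sqz '-' ((sqz '_' t).dropWhile (· == '-')) from by
        conv_lhs => rw [sqz]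
        simp]
      rw [dropWhile_sqz, ih]
  | case3 a t hsp ih =>
    have ha1 : a ≠ '_' := fun h => hsp (Or.inl h)
    have ha2 : a ≠ '-' := fun h => hsp (Or.inr h)
    rw [sqz_cons_ne '_' a _ ha1, sqz_cons_ne '-' a _ ha2, ih]

theorem collB_eq_dsq (l : List Char) : ∀ last : Option Char,
    collB last l = (match last with
      | some c => if c = '_' ∨ c = '-' then dsq (l.dropWhile (· == c)) else dsq l
      | none => dsq l) := by
  induction l with
  | nil => intro last; cases last <;> simp [collB, dsq, List.dropWhile]
  | cons a t ih =>
    intro last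
    by_cases hsp : a = '_' ∨ a = '-'
    · have hdsq : dsq (a :: t) = a :: dsq (t.dropWhile (· == a)) := by
        conv_lhs => rw [dsq]
        simp [hsp]
      match last with
      | none =>
        simp only [collB, hsp, true_and, if_neg (by simp : ¬ (none : Option Char) = some a)]
        rw [ih (some a)]
        simp [hsp, hdsq]
      | some c =>
        by_cases hca : c = a
        · subst hca
          simp only [collB, hsp, true_and, if_pos rfl]
          rw [ih (some c)]
          simp only [if_pos hsp]
          simp [List.dropWhile]
        · have hne : ¬ ((a = '_' ∨ a = '-') ∧ (some c : Option Char) = some a) := by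
            rintro ⟨-, h⟩
            exact hca (Option.some.injEq .. ▸ h)
          simp only [collB, if_neg hne]
          rw [ih (some a)]
          simp only [if_pos hsp]
          by_cases hc : c = '_' ∨ c = '-'
          · simp only [if_pos hc]
            have hac : a ≠ c := fun h => hca h.symm
            have : (a :: t).dropWhile (· == c) = a :: t := by
              simp [List.dropWhile, show (a == c) = false from by simp [hac]]
            rw [this, hdsq]
          · simp only [if_neg hc, hdsq]
    · have ha1 : a ≠ '_' := fun h => hsp (Or.inl h)
      have ha2 : a ≠ '-' := fun h => hsp (Or.inr h)
      have hdsq : dsq (a :: t) = a :: dsq t := by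
        conv_lhs => rw [dsq]
        simp [hsp]
      have hne : ∀ last : Option Char, ¬ ((a = '_' ∨ a = '-') ∧ last = some a) :=
        fun last h => hsp h.1
      match last with
      | none =>
        simp only [collB, if_neg (hne none)]
        rw [ih (some a)]
        simp [hsp, hdsq]
      | some c =>
        simp only [collB, if_neg (hne (some c))]
        rw [ih (some a)]
        simp only [if_neg hsp]
        by_cases hc : c = '_' ∨ c = '-'
        · simp only [if_pos hc]
          have : (a :: t).dropWhile (· == c) = a :: t := by
            have hac : a ≠ c := by rintro rfl; exact hsp hc
            simp [List.dropWhile, show (a == c) = false from by simp [hac]]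
          rw [this, hdsq]
        · simp only [if_neg hc, hdsq]

theorem foldl_nnStep (l : List Char) : ∀ out : List Char,
    l.foldl nnStep out = out ++ collB out.getLast? l := by
  induction l with
  | nil => intro out; simp [collB]
  | cons c t ih =>
    intro out
    by_cases hc : (c = '_' ∨ c = '-') ∧ out ≠ [] ∧ out.getLast? = some c
    · have hstep : nnStep out c = out := by simp [nnStep, hc]
      rw [List.foldl_cons, hstep, ih out]
      have : collB out.getLast? (c :: t) = collB out.getLast? t := by
        rw [collB, if_pos ⟨hc.1, hc.2.2⟩]
      rw [this]
    · have hstep : nnStep out c = out ++ [c] := by simp [nnStep, hc]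
      rw [List.foldl_cons, hstep, ih (out ++ [c])]
      have h1 : (out ++ [c]).getLast? = some c := by simp
      have h2 : collB out.getLast? (c :: t) = c :: collB (some c) t := by
        rw [collB]
        rw [if_neg (by
          rintro ⟨hsp, hlast⟩
          exact hc ⟨hsp, by rintro rfl; simp at hlast, hlast⟩)]
      rw [h1, h2]
      simp

theorem go_single (a b : Char) (fuel : Nat) (l acc : List Char) (h : l.length ≤ fuel) :
    PySem.Chars.replace.go [a] [b] fuel l acc
      = acc.reverse ++ l.map (fun c => if c = a then b else c) := by
  induction fuel generalizing l acc with
  | zero =>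
    have : l = [] := List.length_eq_zero_iff.mp (Nat.le_zero.mp h)
    subst this; simp [PySem.Chars.replace.go]
  | succ n ih =>
    match l with
    | [] => simp [PySem.Chars.replace.go]
    | c :: t =>
      by_cases hc : c = a
      · have hpf : List.isPrefixOf [a] (c :: t) = true := by simp [List.isPrefixOf, hc]
        simp only [PySem.Chars.replace.go, hpf, if_true, List.drop, List.length]
        rw [ih _ _ (by simp at h; omega)]
        simp [hc]
      · have hpf : List.isPrefixOf [a] (c :: t) = false := by
          simp [List.isPrefixOf]; intro h1; exact hc h1.symm
        simp only [PySem.Chars.replace.go, hpf, Bool.false_eq_true, if_false]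
        rw [ih _ _ (by simp at h; omega)]
        simp [hc]

theorem replace_single (a b : Char) (l : List Char) :
    PySem.Chars.replace l [a] [b] = l.map (fun c => if c = a then b else c) := by
  simp [PySem.Chars.replace, go_single a b l.length l [] le_rfl]

theorem map_four (l : List Char) :
    ((((l.map (fun c => if c = '0' then 'O' else c)).map (fun c => if c = 'D' then 'O' else c)).map
        (fun c => if c = 'l' then 'I' else c)).map (fun c => if c = '1' then 'I' else c))
      = l.map nnTrans := by
  simp only [List.map_map]
  apply List.map_congr_left
  intro c _
  simp only [Function.comp, nnTrans]
  by_cases h0 : c = '0' <;> by_cases hD : c = 'D' <;> by_cases hl : c = 'l' <;>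
    by_cases h1 : c = '1' <;> simp_all <;> decide

-- ===== VERDICT (by name: the statement is the Claim_ definition above) =====
theorem norm_name_spec : Claim_equal_norm_name := by
  intro s _
  unfold Spec_norm_name
  have hA : (norm_name s).toList = sqz '-' (sqz '_' (s.toList.map nnTrans)) := by
    unfold norm_name
    rw [squeezeLoop_toList, squeezeLoop_toList]
    simp only [PySem.Str.toList_replace,
      show ("0" : String).toList = ['0'] from rfl, show ("O" : String).toList = ['O'] from rfl,
      show ("D" : String).toList = ['D'] from rfl, show ("l" : String).toList = ['l'] from rfl,
      show ("I" : String).toList = ['I'] from rfl, show ("1" : String).toList = ['1'] from rfl]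
    rw [replace_single, replace_single, replace_single, replace_single, map_four]
  have hB : (norm_name_alt s).toList = dsq (s.toList.map nnTrans) := by
    unfold norm_name_alt
    rw [String.toList_ofList, foldl_nnStep]
    simpa using collB_eq_dsq (s.toList.map nnTrans) none
  apply String.toList_inj.mp
  rw [hA, hB, sqz_sqz_eq_dsq]
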